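-- pv_equiv track=rewrite | github.com/anagarciaaa/AlgoProject | program1.py | program1
-- ===== SOURCE A (Python) =====
-- from typing import List, Tuple
--
-- def program1(n: int, k: int, values: List[int]) -> Tuple[int, List[int]]:
--     """
--     Solution to Program 1
--
--     Parameters:
--     n (int): number of vaults
--     k (int): no two chosen vaults are within k positions of each other
--     values (List[int]): the values of the vaults
--
--     Returns:
--     int:  maximal total value
--     List[int]: the indices of the chosen vaults(1-indexed)
--     """
--     ############################
--     #pick from the rightmost vault, then skip k to the left, repeat.
--     picks = []
--     i = n - 1 #starts at the rightmost index (but based 0 so minus 1)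
--     while i >= 0:
--         picks.append(i)
--         i -= (k+1)
--     #then convert to increasing order and based 1 for output
--     picks.reverse()
--     total_value = sum(values[p] for p in picks)
--     return total_value, [p+1 for p in picks]
-- ===== SOURCE B (Python) =====
-- def program1(n, k, values):
--     if n <= 0:
--         return 0, []
--     total = 0
--     picks = []
--     for p, v in enumerate(values[:n]):
--         if (n - 1 - p) % (k + 1) == 0:
--             total += v
--             picks.append(p + 1)
--     return total, picks
-- ===== Notes on version B (the rewrite author's own statement) =====
-- stated objective: alternative
-- what changed: Instead of generating the chosen index set by jumping right-to-left in steps of k+1 and reversing, B makes one forward pass over every element of values[:n] with enumerate, deciding membership per element by the modular test (n-1-p) % (k+1) == 0 and accumulating the total and the 1-based index list in a single accumulator sweep.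
import Mathlib
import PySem

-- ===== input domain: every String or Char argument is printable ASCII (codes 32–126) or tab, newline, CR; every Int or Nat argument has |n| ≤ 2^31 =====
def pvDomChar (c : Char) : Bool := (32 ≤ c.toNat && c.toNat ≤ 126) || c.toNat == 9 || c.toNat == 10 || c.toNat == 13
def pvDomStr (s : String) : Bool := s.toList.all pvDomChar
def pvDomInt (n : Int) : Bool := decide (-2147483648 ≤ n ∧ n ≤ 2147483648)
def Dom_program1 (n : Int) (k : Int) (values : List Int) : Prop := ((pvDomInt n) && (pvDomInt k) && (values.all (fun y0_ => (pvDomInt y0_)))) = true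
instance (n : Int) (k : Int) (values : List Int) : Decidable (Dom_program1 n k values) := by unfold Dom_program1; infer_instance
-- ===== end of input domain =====

-- B replaces A's backward jump-by-(k+1) index generation with append-then-reverse by a single
-- forward enumerate scan of values[:n] that selects each position by a modular test
-- (objective: alternative).

-- ===== PORT A =====
-- the Python while-loop `while i >= 0: picks.append(i); i -= (k+1)`;
-- the extra `0 < k + 1` guard only totalizes the cases where the Python loop diverges (k ≤ -1)
def program1Loop (k : Int) (i : Int) (picks : List Int) : List Int :=
  if 0 ≤ i ∧ 0 < k + 1 then program1Loop k (i - (k + 1)) (picks ++ [i]) else picks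
termination_by (i + 1).toNat
decreasing_by omega

def program1 (n : Int) (k : Int) (values : List Int) : Int × List Int :=
  let picks := (program1Loop k (n - 1) []).reverse
  ((picks.map (fun p => PySem.List.pyGetD values p 0)).sum, picks.map (fun p => p + 1))

-- ===== PORT B =====
def program1_alt (n : Int) (k : Int) (values : List Int) : Int × List Int :=
  if n ≤ 0 then (0, [])
  else
    (PySem.List.enumerate (PySem.List.slice values none (some n))).foldl
      (fun acc pv =>
        if PySem.Int.mod (n - 1 - pv.1) (k + 1) == 0 then (acc.1 + pv.2, acc.2 ++ [pv.1 + 1])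
        else acc) (0, [])

-- ===== PRECONDITION & SPEC =====
-- Pre_ excludes exactly the inputs where Python A does not return: n ≥ 1 with k < 0 (the loop
-- never advances or moves right: A diverges) and n > len(values) (IndexError on values[p]).
def Pre_program1 (n : Int) (k : Int) (values : List Int) : Prop :=
  n ≤ 0 ∨ (0 ≤ k ∧ n ≤ values.length)
instance (n : Int) (k : Int) (values : List Int) : Decidable (Pre_program1 n k values) := by unfold Pre_program1; infer_instance

def pvWitness_program1 : Int × Int × List Int := (5, 2, [3, -1, 4, 1, 5])

def Spec_program1 (n : Int) (k : Int) (values : List Int) (out : Int × List Int) : Prop := out = program1_alt n k values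
instance (n : Int) (k : Int) (values : List Int) (out : Int × List Int) : Decidable (Spec_program1 n k values out) := by unfold Spec_program1; infer_instance

-- ===== CLAIM (what is proved, stated in full; the proofs are below) =====
def Claim_equal_program1 : Prop := ∀ (n : Int) (k : Int) (values : List Int), Dom_program1 n k values → Pre_program1 n k values → Spec_program1 n k values (program1 n k values)

-- ===== LEMMAS AND PROOFS =====

-- ===== A side (as before) =====
theorem program1Loop_append (k : Int) : ∀ (m : Nat) (i : Int), (i + 1).toNat = m →
    ∀ acc : List Int, program1Loop k i acc = acc ++ program1Loop k i [] := by
  intro m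
  induction m using Nat.strong_induction_on with
  | _ m ih =>
    intro i hm acc
    rw [program1Loop]; conv_rhs => rw [program1Loop]
    by_cases h : 0 ≤ i ∧ 0 < k + 1
    · rw [if_pos h, if_pos h]
      rw [ih ((i - (k + 1)) + 1).toNat (by omega) _ rfl (acc ++ [i]),
          ih ((i - (k + 1)) + 1).toNat (by omega) _ rfl ([] ++ [i])]
      simp
    · rw [if_neg h, if_neg h]
      simp

theorem program1Loop_reverse (k : Int) (hk : 0 ≤ k) : ∀ (m : Nat) (i : Int), i.toNat = m → 0 ≤ i →
    (program1Loop k i []).reverse = PySem.List.pyRange (PySem.Int.mod i (k + 1)) (i + 1) (k + 1) := by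
  have hs : (0 : Int) < k + 1 := by omega
  intro m
  induction m using Nat.strong_induction_on with
  | _ m ih =>
    intro i hm hi
    have hmod := PySem.Int.mod_eq_emod_of_pos (a := i) hs
    have hr0 : 0 ≤ i % (k + 1) := Int.emod_nonneg i (by omega)
    have hrs : i % (k + 1) < k + 1 := Int.emod_lt_of_pos i hs
    rw [program1Loop, if_pos (⟨hi, hs⟩ : 0 ≤ i ∧ 0 < k + 1)]
    by_cases hrec : 0 ≤ i - (k + 1)
    · rw [program1Loop_append k ((i - (k + 1)) + 1).toNat _ rfl]
      simp only [List.nil_append, List.reverse_append, List.reverse_cons, List.reverse_nil,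
        List.nil_append]
      rw [ih (i - (k + 1)).toNat (by omega) _ rfl hrec]
      rw [PySem.Int.mod_eq_emod_of_pos (a := i - (k + 1)) hs, Int.sub_emod_right, hmod]
      have hq : (k + 1) * (i / (k + 1)) + i % (k + 1) = i := Int.mul_ediv_add_emod i (k + 1)
      obtain ⟨q, hqdef⟩ : ∃ q, i / (k + 1) = q := ⟨_, rfl⟩
      obtain ⟨r, hrdef⟩ : ∃ r, i % (k + 1) = r := ⟨_, rfl⟩
      rw [hqdef, hrdef] at hq
      rw [hrdef] at hr0 hrs
      rw [hrdef, PySem.List.pyRange_of_pos _ _ hs, PySem.List.pyRange_of_pos _ _ hs]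
      have hq1 : 1 ≤ q := by nlinarith
      have hlt1 : r < i + 1 := by omega
      have hlt2 : r < i - (k + 1) + 1 := by nlinarith
      rw [if_pos hlt1, if_pos hlt2]
      have hc1 : (i + 1 - r + (k + 1) - 1) / (k + 1) = q + 1 := by
        have e1 : i + 1 - r + (k + 1) - 1 = (k + 1) * (q + 1) := by linear_combination -hq
        rw [e1, Int.mul_ediv_cancel_left _ (by omega)]
      have hc2 : (i - (k + 1) + 1 - r + (k + 1) - 1) / (k + 1) = q := by
        have e2 : i - (k + 1) + 1 - r + (k + 1) - 1 = (k + 1) * q := by linear_combination -hq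
        rw [e2, Int.mul_ediv_cancel_left _ (by omega)]
      rw [hc1, hc2]
      have hqn : (q + 1).toNat = q.toNat + 1 := by omega
      rw [hqn, List.range_succ, List.map_append]
      simp
      rw [max_eq_left (by omega : (0 : Int) ≤ q)]
      linear_combination -hq
    · rw [program1Loop, if_neg (by omega)]
      rw [hmod, Int.emod_eq_of_lt hi (by omega), PySem.List.pyRange_of_pos _ _ hs,
        if_pos (by omega : i < i + 1)]
      have hone : (i + 1 - i + (k + 1) - 1) / (k + 1) = 1 := by
        have e : i + 1 - i + (k + 1) - 1 = k + 1 := by ring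
        rw [e, Int.ediv_self (by omega)]
      rw [hone]
      simp

-- ===== B side =====
theorem foldB (n k : Int) : ∀ (l : List (Int × Int)) (t : Int) (ps : List Int),
    l.foldl (fun acc pv =>
        if PySem.Int.mod (n - 1 - pv.1) (k + 1) == 0 then (acc.1 + pv.2, acc.2 ++ [pv.1 + 1])
        else acc) (t, ps)
    = (t + ((l.filter (fun pv => PySem.Int.mod (n - 1 - pv.1) (k + 1) == 0)).map Prod.snd).sum,
       ps ++ (l.filter (fun pv => PySem.Int.mod (n - 1 - pv.1) (k + 1) == 0)).map (fun pv => pv.1 + 1)) := by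
  intro l
  induction l with
  | nil => simp
  | cons x xs ih =>
    intro t ps
    simp only [List.foldl_cons, List.filter_cons]
    by_cases h : (PySem.Int.mod (n - 1 - x.1) (k + 1) == 0) = true
    · rw [if_pos h, if_pos h, ih]
      simp [add_assoc]
    · rw [if_neg h, if_neg h, ih]

theorem filt_enum (c : Int → Bool) : ∀ (xs : List Int) (s : Int),
    (PySem.List.enumerate xs s).filter (fun pv => c pv.1)
    = ((PySem.List.pyRange s (s + xs.length) 1).filter c).map
        (fun p => (p, PySem.List.pyGetD xs (p - s) 0)) := by
  intro xs
  induction xs with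
  | nil => intro s; simp [PySem.List.enumerate_nil, PySem.List.pyRange_one_eq_nil (le_refl s)]
  | cons x xs ih =>
    intro s
    have hE : s + (((x :: xs).length : Nat) : Int) = s + 1 + (xs.length : Int) := by
      simp; ring
    rw [PySem.List.enumerate_cons, List.filter_cons, hE,
      PySem.List.pyRange_one_cons (by omega : s < s + 1 + (xs.length : Int)), List.filter_cons]
    have htail : (PySem.List.enumerate xs (s + 1)).filter (fun pv => c pv.1)
        = ((PySem.List.pyRange (s + 1) (s + 1 + (xs.length : Int)) 1).filter c).map
            (fun p => (p, PySem.List.pyGetD (x :: xs) (p - s) 0)) := by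
      rw [ih (s + 1)]
      apply List.map_congr_left
      intro p hp
      have hmem : p ∈ PySem.List.pyRange (s + 1) (s + 1 + (xs.length : Int)) 1 :=
        List.mem_of_mem_filter hp
      rw [PySem.List.mem_pyRange_one] at hmem
      have h1 : 0 ≤ p - s := by omega
      have h2 : 0 ≤ p - (s + 1) := by omega
      rw [PySem.List.pyGetD_of_nonneg _ _ h1, PySem.List.pyGetD_of_nonneg _ _ h2]
      have h3 : (p - s).toNat = (p - (s + 1)).toNat + 1 := by omega
      rw [h3, List.getD_cons_succ]
    by_cases h : c s = true
    · rw [if_pos h, if_pos h, htail]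
      simp only [List.map_cons, sub_self]
      rw [PySem.List.pyGetD_of_nonneg _ _ (le_refl 0)]
      simp
    · rw [if_neg h, if_neg h, htail]

theorem range_filter (step r : Int) (hs : 0 < step) (hr : 0 ≤ r) (hrs : r < step) :
    ∀ N : Nat, (PySem.List.pyRange 0 (N : Int) 1).filter (fun p => p % step == r)
      = PySem.List.pyRange r (N : Int) step := by
  intro N
  induction N with
  | zero =>
    simp only [Nat.cast_zero]
    rw [PySem.List.pyRange_one_eq_nil (by norm_num), PySem.List.pyRange_of_pos _ _ hs]
    rw [if_neg (by omega : ¬ r < (0:Int))]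
    simp
  | succ N ih =>
    have hcast : ((N + 1 : Nat) : Int) = (N : Int) + 1 := by push_cast; ring
    rw [hcast, PySem.List.pyRange_one_succ_right (by positivity), List.filter_append, ih]
    rw [PySem.List.pyRange_of_pos r ((N:Int)+1) hs, PySem.List.pyRange_of_pos r (N:Int) hs]
    simp only [List.filter_cons, List.filter_nil]
    by_cases h : ((N : Int) % step == r) = true
    · rw [if_pos h]
      have hNr : (N : Int) % step = r := by simpa using h
      have hq : step * ((N:Int) / step) + (N:Int) % step = (N:Int) := Int.ediv_add_emod _ _
      obtain ⟨q, hqdef⟩ : ∃ q, (N:Int) / step = q := ⟨_, rfl⟩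
      rw [hqdef, hNr] at hq
      have hq0 : 0 ≤ q := by nlinarith
      by_cases hrN : r < (N : Int)
      · have hq1 : 1 ≤ q := by nlinarith
        rw [if_pos hrN, if_pos (by omega : r < (N:Int) + 1)]
        have hc1 : ((N:Int) - r + step - 1) / step = q := by
          have e : (N:Int) - r + step - 1 = (step - 1) + step * q := by linear_combination -hq
          rw [e, Int.add_mul_ediv_left _ _ (by omega), Int.ediv_eq_zero_of_lt (by omega) (by omega)]
          ring
        have hc2 : ((N:Int) + 1 - r + step - 1) / step = q + 1 := by
          have e : (N:Int) + 1 - r + step - 1 = step * (q + 1) := by linear_combination -hq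
          rw [e, Int.mul_ediv_cancel_left _ (by omega)]
        rw [hc1, hc2]
        have hqn : (q + 1).toNat = q.toNat + 1 := by omega
        rw [hqn, List.range_succ, List.map_append]
        simp only [List.map_cons, List.map_nil, List.append_cancel_left_eq]
        have : (q.toNat : Int) = q := by omega
        rw [this]
        simp
        linarith [hq]
      · -- r = N (since N % step = r and ¬ r < N forces r ≥ N; also r < step)
        have hrN' : r = (N : Int) := by
          by_contra hne
          have : (N : Int) < r := by omega
          have : (N : Int) % step = (N : Int) := Int.emod_eq_of_lt (by positivity) (by omega)
          omega
        rw [if_neg hrN, if_pos (by omega : r < (N:Int) + 1)]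
        have hc : ((N:Int) + 1 - r + step - 1) / step = 1 := by
          have e : (N:Int) + 1 - r + step - 1 = step := by omega
          rw [e, Int.ediv_self (by omega)]
        rw [hc]
        simp [hrN']
    · rw [if_neg h]
      have hNr : ¬ ((N : Int) % step = r) := by simpa using h
      simp only [List.append_nil]
      by_cases hrN : r < (N : Int)
      · rw [if_pos hrN, if_pos (by omega : r < (N:Int) + 1)]
        have hq : step * ((N:Int) / step) + (N:Int) % step = (N:Int) := Int.ediv_add_emod _ _
        obtain ⟨q, hqdef⟩ : ∃ q, (N:Int) / step = q := ⟨_, rfl⟩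
        obtain ⟨t0, htdef⟩ : ∃ t, (N:Int) % step = t := ⟨_, rfl⟩
        rw [hqdef, htdef] at hq
        have ht0 : 0 ≤ t0 := by
          rw [← htdef]; exact Int.emod_nonneg _ (by omega)
        have hts : t0 < step := by
          rw [← htdef]; exact Int.emod_lt_of_pos _ hs
        -- need (N - r) written as step*q' + t' with 1 ≤ t' ≤ step-1
        have hd : step * (((N:Int) - r) / step) + ((N:Int) - r) % step = (N:Int) - r :=
          Int.ediv_add_emod _ _
        obtain ⟨q', hq'⟩ : ∃ q', ((N:Int) - r) / step = q' := ⟨_, rfl⟩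
        obtain ⟨t, ht⟩ : ∃ t, ((N:Int) - r) % step = t := ⟨_, rfl⟩
        rw [hq', ht] at hd
        have ht0' : 0 ≤ t := by rw [← ht]; exact Int.emod_nonneg _ (by omega)
        have hts' : t < step := by rw [← ht]; exact Int.emod_lt_of_pos _ hs
        have htne : t ≠ 0 := by
          intro h0
          rw [h0, add_zero] at hd
          have : (N : Int) % step = r := by
            have : (N : Int) = r + step * q' := by linarith
            rw [this, Int.add_mul_emod_self_left, Int.emod_eq_of_lt hr hrs]
          exact hNr this
        have hqpos : 0 ≤ q' := by nlinarith
        have hc1 : ((N:Int) - r + step - 1) / step = q' + 1 := by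
          have e : (N:Int) - r + step - 1 = (t + step - 1) + step * q' := by linarith
          rw [e, Int.add_mul_ediv_left _ _ (by omega)]
          have : (t + step - 1) / step = 1 := by
            have e2 : t + step - 1 = (t - 1) + step * 1 := by ring
            rw [e2, Int.add_mul_ediv_left _ _ (by omega),
              Int.ediv_eq_zero_of_lt (by omega) (by omega)]
            norm_num
          rw [this]; ring
        have hc2 : ((N:Int) + 1 - r + step - 1) / step = q' + 1 := by
          have e : (N:Int) + 1 - r + step - 1 = t + step * (q' + 1) := by linarith
          rw [e, Int.add_mul_ediv_left _ _ (by omega),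
            Int.ediv_eq_zero_of_lt (by omega) (by omega)]
          ring
        rw [hc1, hc2]
      · rw [if_neg hrN]
        have : ¬ r < (N : Int) + 1 := by
          intro hlt
          have : r = (N : Int) := by omega
          have : (N : Int) % step = r := by
            rw [← this]; exact Int.emod_eq_of_lt hr hrs
          exact hNr this
        rw [if_neg this]

theorem program1_eq_alt (n k : Int) (values : List Int) (hpre : Pre_program1 n k values) :
    program1 n k values = program1_alt n k values := by
  unfold program1 program1_alt
  by_cases hn : n ≤ 0
  · rw [program1Loop, if_neg (by omega), if_pos hn]
    simp
  · have hk : 0 ≤ k := by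
      rcases hpre with h | ⟨hk, _⟩
      · omega
      · exact hk
    have hlen : n ≤ (values.length : Int) := by
      rcases hpre with h | ⟨_, h⟩
      · omega
      · exact h
    have hs : (0:Int) < k + 1 := by omega
    rw [if_neg hn]
    -- A side
    have hA := program1Loop_reverse k hk (n - 1).toNat (n - 1) rfl (by omega)
    have hn1 : n - 1 + 1 = n := by ring
    rw [hn1, PySem.Int.mod_eq_emod_of_pos hs] at hA
    set r := (n - 1) % (k + 1) with hrdef
    have hr0 : 0 ≤ r := Int.emod_nonneg _ (by omega)
    have hrs : r < k + 1 := Int.emod_lt_of_pos _ hs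
    -- B side
    rw [PySem.List.slice_to values (by omega : (0:Int) ≤ n)]
    rw [foldB]
    have hfe := filt_enum (fun p => PySem.Int.mod (n - 1 - p) (k + 1) == 0)
      (List.take n.toNat values) 0
    simp only at hfe
    rw [hfe]
    have hxl : ((values.take n.toNat).length : Int) = n := by
      simp; omega
    rw [hxl]
    simp only [zero_add, sub_zero, zero_add]
    have hfc : (PySem.List.pyRange 0 n 1).filter (fun p => PySem.Int.mod (n - 1 - p) (k + 1) == 0)
        = (PySem.List.pyRange 0 n 1).filter (fun p => p % (k + 1) == r) := by
      apply List.filter_congr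
      intro p _
      rw [PySem.Int.mod_eq_emod_of_pos hs, Bool.eq_iff_iff, beq_iff_eq, beq_iff_eq]
      rw [PySem.Int.emod_eq_zero_iff_dvd, hrdef, eq_comm,
        Int.emod_eq_emod_iff_emod_sub_eq_zero, PySem.Int.emod_eq_zero_iff_dvd]
    rw [hfc]
    have hcast : ((n.toNat : Nat) : Int) = n := by omega
    have hrf := range_filter (k + 1) r hs hr0 hrs n.toNat
    rw [hcast] at hrf
    rw [hrf]
    simp only [List.map_map]
    have hget : ∀ p ∈ PySem.List.pyRange r n (k + 1),
        PySem.List.pyGetD (values.take n.toNat) p 0 = PySem.List.pyGetD values p 0 := by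
      intro p hp
      rw [PySem.List.mem_pyRange_iff_of_pos hs] at hp
      rw [PySem.List.pyGetD_of_nonneg _ _ (by omega), PySem.List.pyGetD_of_nonneg _ _ (by omega)]
      rw [List.getD_eq_getElem?_getD, List.getD_eq_getElem?_getD, List.getElem?_take,
        if_pos (by omega : p.toNat < n.toNat)]
    rw [hA, List.nil_append]
    simp only [Prod.mk.injEq]
    refine ⟨?_, ?_⟩
    · congr 1
      apply List.map_congr_left
      intro p hp
      simp only [Function.comp_apply]
      exact (hget p hp).symm
    · apply List.map_congr_left
      intro p hp
      simp

-- ===== VERDICT (by name: the statement is the Claim_ definition above) =====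
theorem program1_spec : Claim_equal_program1 := by
  intro n k values _ hpre
  unfold Spec_program1
  exact program1_eq_alt n k values hpre
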